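-- pv_equiv track=rewrite | github.com/Fogapod/BotMyBot | utils/formatters.py | cleanup_code
-- ===== SOURCE A (Python) =====
-- def cleanup_code(text):
--     lang = None
--     if len(text) > 6 and text[:3] == '```' and text[-3:] == '```':
--         text = text[3:-3]
--         lang = ''
--         for i, c in enumerate(text):
--             if c.isspace():
--                 if c == '\n':
--                     break
--             else:
--                 lang += c
--         text = text[i + 1:]
--     return text, lang
-- ===== SOURCE B (Python) =====
-- def cleanup_code(text):
--     if len(text) > 6 and text[:3] == '```' and text[-3:] == '```':
--         body = text[3:-3]
--         first, _, rest = body.partition('\n')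
--         return rest, ''.join(c for c in first if not c.isspace())
--     return text, None
-- ===== Notes on version B (the rewrite author's own statement) =====
-- stated objective: simpler
-- what changed: Replaces the index-tracking char-by-char scanner (with break and accumulator) by a two-pass decomposition: partition the body at the first newline, then filter whitespace out of the head.
import Mathlib
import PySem

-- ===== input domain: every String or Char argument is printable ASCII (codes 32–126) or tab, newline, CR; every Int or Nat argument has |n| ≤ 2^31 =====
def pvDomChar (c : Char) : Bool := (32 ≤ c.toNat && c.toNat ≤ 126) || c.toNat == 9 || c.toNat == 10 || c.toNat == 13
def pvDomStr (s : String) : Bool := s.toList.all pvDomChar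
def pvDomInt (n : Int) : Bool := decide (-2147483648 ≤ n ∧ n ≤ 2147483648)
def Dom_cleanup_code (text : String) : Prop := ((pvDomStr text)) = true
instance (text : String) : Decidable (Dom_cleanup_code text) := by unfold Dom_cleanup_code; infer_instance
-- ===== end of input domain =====

-- B replaces A's index-tracking char scan by partition-at-first-newline plus a whitespace filter (objective: simpler).

-- ===== PORT A =====
-- A's for-loop: walks the body char by char, skipping non-newline whitespace, appending
-- other chars to lang, breaking at the first '\n'; returns (lang, text after consumed part).
-- (Python's `text = text[i+1:]` with loop exhaustion yields '' — the [] case below.)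
def pvCleanupLoopA : List Char → List Char × List Char
  | [] => ([], [])
  | c :: rest =>
    if PySem.Chars.isspace c then
      if c = '\n' then ([], rest)
      else pvCleanupLoopA rest
    else
      let (l, t) := pvCleanupLoopA rest
      (c :: l, t)

def cleanup_code (text : String) : String × Option String :=
  let cs := text.toList
  if 6 < cs.length ∧ PySem.List.slice cs none (some 3) = ['`', '`', '`']
      ∧ PySem.List.slice cs (some (-3)) none = ['`', '`', '`'] then
    let body := PySem.List.slice cs (some 3) (some (-3))
    let p := pvCleanupLoopA body
    (String.ofList p.2, some (String.ofList p.1))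
  else
    (text, none)

-- ===== PORT B =====
-- B: body.partition('\n') (takeWhile / drop-past for a one-char separator; with no '\n'
-- the drop runs off the end, i.e. rest = ''), then filter whitespace out of the head.
def cleanup_code_alt (text : String) : String × Option String :=
  let cs := text.toList
  if 6 < cs.length ∧ PySem.List.slice cs none (some 3) = ['`', '`', '`']
      ∧ PySem.List.slice cs (some (-3)) none = ['`', '`', '`'] then
    let body := PySem.List.slice cs (some 3) (some (-3))
    let first := body.takeWhile (fun c => c ≠ '\n')
    let rest := body.drop (first.length + 1)
    (String.ofList rest, some (String.ofList (first.filter (fun c => !PySem.Chars.isspace c))))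
  else
    (text, none)

-- ===== PRECONDITION & SPEC =====
def Spec_cleanup_code (text : String) (out : String × Option String) : Prop := out = cleanup_code_alt text
instance (text : String) (out : String × Option String) : Decidable (Spec_cleanup_code text out) := by unfold Spec_cleanup_code; infer_instance

-- ===== CLAIM (what is proved, stated in full; the proofs are below) =====
def Claim_equal_cleanup_code : Prop := ∀ (text : String), Dom_cleanup_code text → Spec_cleanup_code text (cleanup_code text)

-- ===== LEMMAS AND PROOFS =====

-- A's scan equals B's (filter ∘ takeWhile, drop past the first newline).
theorem pvCleanupLoopA_eq (l : List Char) :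
    pvCleanupLoopA l =
      ((l.takeWhile (fun c => c ≠ '\n')).filter (fun c => !PySem.Chars.isspace c),
       l.drop ((l.takeWhile (fun c => c ≠ '\n')).length + 1)) := by
  induction l with
  | nil => rfl
  | cons c rest ih =>
    by_cases hn : c = '\n'
    · subst hn
      simp [pvCleanupLoopA, List.takeWhile]
      decide
    · have hp : (fun c => decide (c ≠ '\n')) c = true := by simp [hn]
      by_cases hs : PySem.Chars.isspace c = true
      · simp [pvCleanupLoopA, hs, hn, ih, List.takeWhile]
      · simp [pvCleanupLoopA, hs, hn, ih, List.takeWhile]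

-- ===== VERDICT (by name: the statement is the Claim_ definition above) =====
theorem cleanup_code_spec : Claim_equal_cleanup_code := by
  intro text _
  unfold Spec_cleanup_code cleanup_code cleanup_code_alt
  dsimp only
  split
  · simp [pvCleanupLoopA_eq]
  · rfl
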